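-- pv_equiv track=rewrite | github.com/giteehubby/ClawEvalkit | work/nanopro/benchmarks/scikillbench/benchmark_tasks_and_results/evaluation/benchmark_evaluator.py | _compare_string_lists_order_independent
-- ===== SOURCE A (Python) =====
-- from typing import Any, Dict, List, Optional, Union, Tuple
-- from collections import Counter
--
-- def _compare_string_lists_order_independent(actual: List[str], expected: List[str]) -> bool:
--     """
--     Compare string lists allowing order changes and ignoring whitespace.
--     Example: ["A", "B"] matches ["B", "A"], and whitespace is ignored.
--     """
--     def _normalize_str(s):
--         return str(s).replace(' ', '')
--     if len(actual) != len(expected):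
--         return False
--     # Use Counter to handle duplicates correctly, ignore whitespace
--     actual_counter = Counter(_normalize_str(item) for item in actual)
--     expected_counter = Counter(_normalize_str(item) for item in expected)
--     return actual_counter == expected_counter
-- ===== SOURCE B (Python) =====
-- def _compare_string_lists_order_independent(actual, expected):
--     """Compare string lists order-independently, ignoring spaces: sort-and-compare."""
--     def _normalize_str(s):
--         return str(s).replace(' ', '')
--     return sorted(_normalize_str(x) for x in actual) == sorted(_normalize_str(x) for x in expected)
-- ===== Notes on version B (the rewrite author's own statement) =====
-- stated objective: simpler
-- what changed: Replaces the length guard plus two Counter frequency tables with a single sorted-normalized-lists positional comparison; multiset equality via sorting is exactly Counter equality.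
import Mathlib
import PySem

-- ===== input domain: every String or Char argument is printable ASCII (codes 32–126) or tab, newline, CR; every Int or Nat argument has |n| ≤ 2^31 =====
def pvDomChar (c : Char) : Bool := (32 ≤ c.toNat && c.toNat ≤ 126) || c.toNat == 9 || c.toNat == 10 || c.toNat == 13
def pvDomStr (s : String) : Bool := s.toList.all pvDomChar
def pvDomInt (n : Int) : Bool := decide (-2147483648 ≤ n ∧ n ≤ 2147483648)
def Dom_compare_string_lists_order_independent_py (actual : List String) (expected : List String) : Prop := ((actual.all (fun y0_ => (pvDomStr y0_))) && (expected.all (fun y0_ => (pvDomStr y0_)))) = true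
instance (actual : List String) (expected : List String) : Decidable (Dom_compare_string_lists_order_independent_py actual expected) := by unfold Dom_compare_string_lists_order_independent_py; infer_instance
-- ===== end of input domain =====

-- B replaces the length guard + two Counters by comparing the sorted normalized lists; simpler, same result.

-- ===== PORT A =====
-- _normalize_str(s) = str(s).replace(' ', '')  (str() is the identity on a String argument)
def pvNormA (s : String) : String := PySem.Str.replace s " " ""

-- Python's Counter == is dict == (order-ignoring): equal key sets and equal counts per key.
def compare_string_lists_order_independent_py (actual : List String) (expected : List String) : Bool :=
  if actual.length ≠ expected.length then false
  else
    let actual_counter := PySem.Dict.counter (actual.map pvNormA)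
    let expected_counter := PySem.Dict.counter (expected.map pvNormA)
    PySem.Set.equal actual_counter.keys expected_counter.keys &&
      actual_counter.keys.all (fun k => actual_counter.getD k 0 == expected_counter.getD k 0)

-- ===== PORT B =====
-- Source B defines the same _normalize_str; the shared helper pvNormA is its port too.
def compare_string_lists_order_independent_py_alt (actual : List String) (expected : List String) : Bool :=
  PySem.List.sorted (actual.map pvNormA) (fun x => x) false ==
    PySem.List.sorted (expected.map pvNormA) (fun x => x) false

-- ===== PRECONDITION & SPEC =====
def Spec_compare_string_lists_order_independent_py (actual : List String) (expected : List String) (out : Bool) : Prop := out = compare_string_lists_order_independent_py_alt actual expected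
instance (actual : List String) (expected : List String) (out : Bool) : Decidable (Spec_compare_string_lists_order_independent_py actual expected out) := by unfold Spec_compare_string_lists_order_independent_py; infer_instance

-- ===== CLAIM (what is proved, stated in full; the proofs are below) =====
def Claim_equal_compare_string_lists_order_independent_py : Prop := ∀ (actual : List String) (expected : List String), Dom_compare_string_lists_order_independent_py actual expected → Spec_compare_string_lists_order_independent_py actual expected (compare_string_lists_order_independent_py actual expected)

-- ===== LEMMAS AND PROOFS =====

-- A's counter comparison (keys as a set + per-key counts) holds iff the normalized lists are permutations.
lemma counterEq_iff_perm (a e : List String) :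
    (PySem.Set.equal (PySem.Dict.counter a).keys (PySem.Dict.counter e).keys &&
      (PySem.Dict.counter a).keys.all
        (fun k => (PySem.Dict.counter a).getD k 0 == (PySem.Dict.counter e).getD k 0)) = true
      ↔ a.Perm e := by
  simp only [Bool.and_eq_true, List.all_eq_true, PySem.Dict.getD_counter,
    PySem.Dict.keys_counter, PySem.Set.equal_iff, PySem.Set.mem_ofList, beq_iff_eq]
  constructor
  · rintro ⟨hmem, hcnt⟩
    rw [List.perm_iff_count]
    intro v
    by_cases hv : v ∈ a
    · exact_mod_cast hcnt v hv
    · have hve : v ∉ e := fun h => hv ((hmem v).mpr h)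
      rw [List.count_eq_zero.mpr hv, List.count_eq_zero.mpr hve]
  · intro hp
    refine ⟨fun x => ⟨fun hx => hp.mem_iff.mp hx, fun hx => hp.mem_iff.mpr hx⟩, ?_⟩
    intro k _
    exact_mod_cast (List.perm_iff_count.mp hp k)

-- ===== VERDICT (by name: the statement is the Claim_ definition above) =====
theorem compare_string_lists_order_independent_py_spec : Claim_equal_compare_string_lists_order_independent_py := by
  intro actual expected _
  unfold Spec_compare_string_lists_order_independent_py
  unfold compare_string_lists_order_independent_py compare_string_lists_order_independent_py_alt
  have hnorm : pvNormA = pvNormA := rfl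
  rw [hnorm]
  by_cases hperm : (actual.map pvNormA).Perm (expected.map pvNormA)
  · have hlen : actual.length = expected.length := by
      have := hperm.length_eq; simpa using this
    simp only [hlen, ne_eq, not_true_eq_false, if_false]
    rw [(counterEq_iff_perm _ _).mpr hperm]
    symm
    rw [beq_iff_eq]
    exact PySem.List.sorted_eq_sorted_of_perm _ _ _ (fun _ _ h => h) hperm
  · have hB : (PySem.List.sorted (actual.map pvNormA) (fun x => x) false ==
        PySem.List.sorted (expected.map pvNormA) (fun x => x) false) = false := by
      rw [beq_eq_false_iff_ne]
      intro h
      exact hperm ((PySem.List.sorted_id_eq_sorted_id_iff_perm _ _).mp h)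
    rw [hB]
    split_ifs with h
    · rfl
    · rw [Bool.eq_false_iff]
      intro hA
      exact hperm ((counterEq_iff_perm _ _).mp hA)
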